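-- pv_equiv track=rewrite | github.com/HACO8888/NTUT-Python-Course-Exam | 20251106/A/1.py | rectangle_numbers
-- ===== SOURCE A (Python) =====
-- def rectangle_numbers(n):
--     rect_numbers = []
--     i = 1
--     while True:
--         rect_num = i * (i + 1)
--         if rect_num < n:
--             rect_numbers.append(rect_num)
--             i += 1
--         else:
--             break
--     return rect_numbers
-- ===== SOURCE B (Python) =====
-- def rectangle_numbers(n):
--     if n <= 2:
--         return []
--     # exponentially grow an upper bound hi with hi*(hi+1) >= n
--     hi = 2
--     while hi * (hi + 1) < n:
--         hi *= 2
--     # binary search: largest lo with lo*(lo+1) < n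
--     lo = 1
--     while hi - lo > 1:
--         mid = (lo + hi) // 2
--         if mid * (mid + 1) < n:
--             lo = mid
--         else:
--             hi = mid
--     return [i * (i + 1) for i in range(1, lo + 1)]
-- ===== Notes on version B (the rewrite author's own statement) =====
-- stated objective: alternative
-- what changed: Replaces A's iterate-and-test loop by computing the largest index lo with lo*(lo+1) < n via exponential growth plus binary search, then generating the list with no per-element comparison.
import Mathlib
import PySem

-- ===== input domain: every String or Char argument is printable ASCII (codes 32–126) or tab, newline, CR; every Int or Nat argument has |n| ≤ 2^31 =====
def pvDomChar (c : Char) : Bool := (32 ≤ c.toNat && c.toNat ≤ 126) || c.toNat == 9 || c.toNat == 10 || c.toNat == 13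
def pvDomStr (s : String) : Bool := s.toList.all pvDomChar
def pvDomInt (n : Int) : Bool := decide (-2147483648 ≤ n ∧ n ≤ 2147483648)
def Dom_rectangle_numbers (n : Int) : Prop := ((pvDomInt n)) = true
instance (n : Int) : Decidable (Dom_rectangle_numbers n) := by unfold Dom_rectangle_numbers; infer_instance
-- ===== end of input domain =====

-- B replaces A's iterate-and-test loop by an exponential-growth + binary-search
-- computation of the last index, then a comparison-free generation pass (alternative
-- decomposition, similar cost).

-- ===== PORT A =====
-- the 'while True' loop: append i*(i+1) while it is < n, advancing i
def rectLoop (n i : Int) (acc : List Int) : List Int :=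
  if _h : i * (i + 1) < n then rectLoop n (i + 1) (acc ++ [i * (i + 1)]) else acc
termination_by (n - i).toNat
decreasing_by
  have hi2 : i ≤ i * (i + 1) := by nlinarith [sq_nonneg i]
  omega

def rectangle_numbers (n : Int) : List Int := rectLoop n 1 []

-- ===== PORT B =====
-- grow hi by doubling until hi*(hi+1) >= n (the '1 ≤ hi' conjunct is a totality
-- guard only: B always calls this with hi = 2 and doubling keeps hi ≥ 1)
def growHi (n hi : Int) : Int :=
  if _h : 1 ≤ hi ∧ hi * (hi + 1) < n then growHi n (hi * 2) else hi
termination_by (n - hi).toNat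
decreasing_by
  have hi2 : hi ≤ hi * (hi + 1) := by nlinarith [sq_nonneg hi]
  omega

-- binary search: largest lo in [lo, hi) with lo*(lo+1) < n, given the bracket invariant
def bsearch (n lo hi : Int) : Int :=
  if _h : hi - lo > 1 then
    let mid := PySem.Int.floordiv (lo + hi) 2
    if mid * (mid + 1) < n then bsearch n mid hi else bsearch n lo mid
  else lo
termination_by (hi - lo).toNat
decreasing_by
  all_goals
    simp only [PySem.Int.floordiv, Int.fdiv_eq_ediv] at *
    omega

def rectangle_numbers_alt (n : Int) : List Int :=
  if n ≤ 2 then []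
  else
    let hi := growHi n 2
    let lo := bsearch n 1 hi
    (PySem.List.pyRange 1 (lo + 1) 1).map (fun i => i * (i + 1))

-- ===== PRECONDITION & SPEC =====
def Spec_rectangle_numbers (n : Int) (out : List Int) : Prop := out = rectangle_numbers_alt n
instance (n : Int) (out : List Int) : Decidable (Spec_rectangle_numbers n out) := by unfold Spec_rectangle_numbers; infer_instance

-- ===== CLAIM (what is proved, stated in full; the proofs are below) =====
def Claim_equal_rectangle_numbers : Prop := ∀ (n : Int), Dom_rectangle_numbers n → Spec_rectangle_numbers n (rectangle_numbers n)

-- ===== LEMMAS AND PROOFS =====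

-- A's loop, for i in [1, m+1] with (m+1)*(m+2) ≥ n, appends exactly the products for [i, m]
lemma rectLoop_spec (n m : Int) (hm : n ≤ (m + 1) * (m + 2)) :
    ∀ i acc, 1 ≤ i → i ≤ m + 1 → (m * (m + 1) < n ∨ i = m + 1) →
      rectLoop n i acc = acc ++ (PySem.List.pyRange i (m + 1) 1).map (fun j => j * (j + 1)) := by
  intro i acc h1 h2 h3
  induction' hwf : (m + 1 - i).toNat using Nat.strong_induction_on with k ih generalizing i acc
  rw [rectLoop]
  split_ifs with hlt
  · have hne : i ≠ m + 1 := by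
      rintro rfl
      have hexp : (m + 1) * (m + 1 + 1) = (m + 1) * (m + 2) := by ring
      omega
    have hi_le_m : i ≤ m := by omega
    have hmn : m * (m + 1) < n := by
      rcases h3 with h | h
      · exact h
      · omega
    rw [ih (m + 1 - (i + 1)).toNat (by omega) (i + 1) _ (by omega) (by omega) (Or.inl hmn) rfl]
    rw [PySem.List.pyRange_one_cons (by omega : i < m + 1)]
    simp
  · have hi_eq : i = m + 1 := by
      rcases h3 with h | h
      · by_contra hne
        have hi_le_m : i ≤ m := by omega
        have : i * (i + 1) ≤ m * (m + 1) := by nlinarith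
        omega
      · exact h
    rw [hi_eq, PySem.List.pyRange_one_eq_nil (by omega)]
    simp

lemma growHi_spec (n : Int) : ∀ hi, 1 ≤ hi → 1 ≤ growHi n hi ∧ hi ≤ growHi n hi ∧ n ≤ growHi n hi * (growHi n hi + 1) := by
  intro hi h1
  induction' hwf : (n - hi).toNat using Nat.strong_induction_on with k ih generalizing hi
  rw [growHi]
  split_ifs with hcond
  · obtain ⟨hg, hlt⟩ := hcond
    have hi2 : hi ≤ hi * (hi + 1) := by nlinarith [sq_nonneg hi]
    have := ih (n - hi * 2).toNat (by omega) (hi * 2) (by omega) rfl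
    omega
  · push Not at hcond
    exact ⟨h1, le_refl _, by have := hcond h1; omega⟩

lemma bsearch_spec (n : Int) : ∀ lo hi, 1 ≤ lo → lo < hi → lo * (lo + 1) < n → n ≤ hi * (hi + 1) →
    1 ≤ bsearch n lo hi ∧ bsearch n lo hi * (bsearch n lo hi + 1) < n ∧
      n ≤ (bsearch n lo hi + 1) * (bsearch n lo hi + 2) := by
  intro lo hi h1 hlt hlo hhi
  induction' hwf : (hi - lo).toNat using Nat.strong_induction_on with k ih generalizing lo hi
  rw [bsearch]
  split_ifs with hgap
  · have hmid : PySem.Int.floordiv (lo + hi) 2 = (lo + hi) / 2 := by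
      simp [PySem.Int.floordiv, Int.fdiv_eq_ediv]
    set mid := PySem.Int.floordiv (lo + hi) 2 with hmiddef
    have hbnd : lo < mid ∧ mid < hi := by rw [hmid]; omega
    simp only
    split_ifs with hmlt
    · exact ih (hi - mid).toNat (by omega) mid hi (by omega) (by omega) hmlt hhi rfl
    · exact ih (mid - lo).toNat (by omega) lo mid h1 (by omega) hlo (by omega) rfl
  · have : hi = lo + 1 := by omega
    refine ⟨h1, hlo, ?_⟩
    rw [this] at hhi
    have : (lo + 1) * (lo + 1 + 1) = (lo + 1) * (lo + 2) := by ring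
    omega

-- ===== VERDICT =====
theorem rectangle_numbers_spec : Claim_equal_rectangle_numbers := by
  intro n _
  unfold Spec_rectangle_numbers rectangle_numbers rectangle_numbers_alt
  split_ifs with hle
  · rw [rectLoop]
    split_ifs with h
    · omega
    · rfl
  · push Not at hle
    obtain ⟨hg1, hg2, hgn⟩ := growHi_spec n 2 (by omega)
    obtain ⟨hb1, hblt, hbge⟩ := bsearch_spec n 1 (growHi n 2) (le_refl 1) (by omega) (by omega) hgn
    exact rectLoop_spec n (bsearch n 1 (growHi n 2)) hbge 1 [] (le_refl 1) (by omega) (Or.inl hblt)
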